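-- pv_equiv track=rewrite | github.com/siripragadashashank/psa_final_project_spring22 | states.py | get_required_action
-- ===== SOURCE A (Python) =====
-- def get_required_action(cur_action, nrotates, nflips):
--     '''
--     Given an action, number of rotation and flips
--
--     Retruns: Transformed action
--     '''
--     if nflips == 1:
--
--         if cur_action == 0:   cur_action = 2
--         elif cur_action == 3: cur_action = 5
--         elif cur_action == 6: cur_action = 8
--         elif cur_action == 2: cur_action = 0
--         elif cur_action == 5: cur_action = 3
--         elif cur_action == 8: cur_action = 6
--
--     while nrotates > 0:
--
--         nrotates = nrotates - 1
--
--         if cur_action == 1:   cur_action = 5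
--         elif cur_action == 5: cur_action = 7
--         elif cur_action == 7: cur_action = 3
--         elif cur_action == 3: cur_action = 1
--         elif cur_action == 0: cur_action = 2
--         elif cur_action == 2: cur_action = 8
--         elif cur_action == 8: cur_action = 6
--         elif cur_action == 6: cur_action = 0
--
--     return cur_action
-- ===== SOURCE B (Python) =====
-- def get_required_action(cur_action, nrotates, nflips):
--     # Treat the action as a cell (row, col) of the 3x3 grid; flip = horizontal
--     # mirror, rotation = clockwise quarter-turn, applied nrotates mod 4 times.
--     if not (0 <= cur_action <= 8):
--         return cur_action
--     r, c = divmod(cur_action, 3)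
--     if nflips == 1:
--         c = 2 - c
--     k = nrotates % 4 if nrotates > 0 else 0
--     for _ in range(k):
--         r, c = c, 2 - r
--     return 3 * r + c
-- ===== Notes on version B (the rewrite author's own statement) =====
-- stated objective: faster
-- what changed: B replaces the flip/rotation lookup chains and the O(nrotates) while loop by coordinate arithmetic on the 3x3 grid ((r,c)=divmod(a,3), mirror c=2-c, quarter-turn (r,c)->(c,2-r)) applied nrotates mod 4 times.
import Mathlib
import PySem

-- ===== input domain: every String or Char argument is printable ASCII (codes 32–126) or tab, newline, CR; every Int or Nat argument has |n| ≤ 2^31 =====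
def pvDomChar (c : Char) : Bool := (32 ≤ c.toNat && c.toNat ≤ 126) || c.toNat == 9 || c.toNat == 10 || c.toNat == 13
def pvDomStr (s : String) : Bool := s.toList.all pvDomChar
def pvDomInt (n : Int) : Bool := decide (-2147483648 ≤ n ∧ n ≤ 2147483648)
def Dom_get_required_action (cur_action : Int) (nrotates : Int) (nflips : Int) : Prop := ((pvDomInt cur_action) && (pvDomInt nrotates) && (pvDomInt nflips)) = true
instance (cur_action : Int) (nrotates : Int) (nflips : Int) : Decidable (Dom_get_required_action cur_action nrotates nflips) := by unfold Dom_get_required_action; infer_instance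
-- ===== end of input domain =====

-- B replaces A's lookup chains and O(nrotates) while loop by 3x3 grid coordinate
-- arithmetic with the rotation count reduced mod 4 (objective: faster).

-- ===== PORT A =====
-- the if/elif chain inside A's while loop
def pvRotA (a : Int) : Int :=
  if a = 1 then 5
  else if a = 5 then 7
  else if a = 7 then 3
  else if a = 3 then 1
  else if a = 0 then 2
  else if a = 2 then 8
  else if a = 8 then 6
  else if a = 6 then 0
  else a

-- A's `while nrotates > 0` loop
def pvLoopA (cur_action : Int) (nrotates : Int) : Int :=
  if _h : nrotates > 0 then pvLoopA (pvRotA cur_action) (nrotates - 1)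
  else cur_action
termination_by nrotates.toNat
decreasing_by omega

def get_required_action (cur_action : Int) (nrotates : Int) (nflips : Int) : Int :=
  let cur_action :=
    if nflips = 1 then
      if cur_action = 0 then 2
      else if cur_action = 3 then 5
      else if cur_action = 6 then 8
      else if cur_action = 2 then 0
      else if cur_action = 5 then 3
      else if cur_action = 8 then 6
      else cur_action
    else cur_action
  pvLoopA cur_action nrotates

-- ===== PORT B =====
-- Source B's `for _ in range(k): r, c = c, 2 - r`
def pvRotPair : Nat → Int × Int → Int × Int
  | 0, p => p
  | m + 1, (r, c) => pvRotPair m (c, 2 - r)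

def get_required_action_alt (cur_action : Int) (nrotates : Int) (nflips : Int) : Int :=
  if ¬ (0 ≤ cur_action ∧ cur_action ≤ 8) then cur_action
  else
    let r := PySem.Int.floordiv cur_action 3
    let c := PySem.Int.mod cur_action 3
    let c := if nflips = 1 then 2 - c else c
    let k : Int := if nrotates > 0 then PySem.Int.mod nrotates 4 else 0
    let p := pvRotPair k.toNat (r, c)
    3 * p.1 + p.2

-- ===== PRECONDITION & SPEC =====
def Spec_get_required_action (cur_action : Int) (nrotates : Int) (nflips : Int) (out : Int) : Prop := out = get_required_action_alt cur_action nrotates nflips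
instance (cur_action : Int) (nrotates : Int) (nflips : Int) (out : Int) : Decidable (Spec_get_required_action cur_action nrotates nflips out) := by unfold Spec_get_required_action; infer_instance

-- ===== CLAIM (what is proved, stated in full; the proofs are below) =====
def Claim_equal_get_required_action : Prop := ∀ (cur_action : Int) (nrotates : Int) (nflips : Int), Dom_get_required_action cur_action nrotates nflips → Spec_get_required_action cur_action nrotates nflips (get_required_action cur_action nrotates nflips)

-- ===== LEMMAS AND PROOFS =====

theorem pvRotA_fixed {a : Int} (h : a < 0 ∨ 8 < a) : pvRotA a = a := by
  unfold pvRotA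
  split_ifs <;> omega

-- pvRotA has order 4 on every integer
theorem pvRotA_four (a : Int) : pvRotA (pvRotA (pvRotA (pvRotA a))) = a := by
  by_cases h : 0 ≤ a ∧ a ≤ 8
  · obtain ⟨h0, h8⟩ := h
    interval_cases a <;> decide
  · have hf : pvRotA a = a := pvRotA_fixed (by omega)
    rw [hf, hf, hf, hf]

-- A's loop is pvRotA iterated nrotates.toNat times
theorem pvLoopA_eq_iterate (n : Int) (a : Int) :
    pvLoopA a n = pvRotA^[n.toNat] a := by
  rw [pvLoopA]
  split
  · rename_i h
    have hn : n.toNat = (n - 1).toNat + 1 := by omega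
    rw [pvLoopA_eq_iterate (n - 1) (pvRotA a), hn, Function.iterate_succ_apply]
  · rename_i h
    have hn : n.toNat = 0 := by omega
    simp [hn]
termination_by n.toNat
decreasing_by omega

theorem pvRotA_iterate_mod (m : Nat) (a : Int) :
    pvRotA^[m] a = pvRotA^[m % 4] a := by
  induction m using Nat.strong_induction_on with
  | _ m ih =>
    by_cases h : m < 4
    · rw [Nat.mod_eq_of_lt h]
    · have hm : m = (m - 4) + 4 := by omega
      rw [hm, Function.iterate_add_apply]
      have h4 : pvRotA^[4] a = a := by
        show pvRotA (pvRotA (pvRotA (pvRotA a))) = a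
        exact pvRotA_four a
      rw [h4, ih (m - 4) (by omega)]
      congr 1
      omega

theorem pvLoopA_out_of_range (n : Int) (a : Int) (h : a < 0 ∨ 8 < a) :
    pvLoopA a n = a := by
  rw [pvLoopA_eq_iterate]
  exact Function.iterate_fixed (pvRotA_fixed h) _

-- the agreement of the two ports, with the rotation count already reduced to j < 4
theorem ports_agree_small (a : Int) (ha0 : 0 ≤ a) (ha8 : a ≤ 8) (f : Int) (j : Nat) (hj : j < 4) :
    pvRotA^[j]
      (if f = 1 then
          if a = 0 then 2 else if a = 3 then 5 else if a = 6 then 8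
          else if a = 2 then 0 else if a = 5 then 3 else if a = 8 then 6 else a
        else a)
    = (3 * (pvRotPair j (PySem.Int.floordiv a 3,
          if f = 1 then 2 - PySem.Int.mod a 3 else PySem.Int.mod a 3)).1
        + (pvRotPair j (PySem.Int.floordiv a 3,
          if f = 1 then 2 - PySem.Int.mod a 3 else PySem.Int.mod a 3)).2) := by
  by_cases hf : f = 1 <;>
    simp only [hf, if_true, if_false] <;>
      interval_cases a <;> interval_cases j <;> decide

-- ===== VERDICT (by name: the statement is the Claim_ definition above) =====
theorem get_required_action_spec : Claim_equal_get_required_action := by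
  intro a n f _
  unfold Spec_get_required_action get_required_action get_required_action_alt
  by_cases hr : 0 ≤ a ∧ a ≤ 8
  · simp only [hr]
    obtain ⟨ha0, ha8⟩ := hr
    rw [pvLoopA_eq_iterate, pvRotA_iterate_mod]
    have hk : (if n > 0 then PySem.Int.mod n 4 else 0).toNat = n.toNat % 4 := by
      by_cases hn : n > 0
      · simp only [hn, if_true]
        rw [PySem.Int.mod_eq_emod_of_pos (by omega)]
        omega
      · simp only [hn, if_false]
        omega
    rw [hk]
    exact ports_agree_small a ha0 ha8 f (n.toNat % 4) (Nat.mod_lt _ (by omega))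
  · simp only [hr, not_false_eq_true, if_true]
    have hout : a < 0 ∨ 8 < a := by omega
    have hflip :
        (if f = 1 then
            if a = 0 then 2 else if a = 3 then 5 else if a = 6 then 8
            else if a = 2 then 0 else if a = 5 then 3 else if a = 8 then 6 else a
          else a) = a := by
      split_ifs <;> omega
    rw [hflip, pvLoopA_out_of_range n a hout]
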